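-- pv_equiv track=rewrite | github.com/runexperiment/MLCCI-Experiment | Tool_optimization.py | clean_cov
-- ===== SOURCE A (Python) =====
-- def clean_cov(covMatrix_int, fault_location):
--     code_num = len(covMatrix_int[0])
--     test_num = len(covMatrix_int)
--     code_to_complete = {}
--     rm_list = []
--     temp = 0
--     for index1 in range(code_num):
--         if covMatrix_int[0][index1] == 2:
--             rm_list.append(index1)
--         else:
--             code_to_complete[temp] = index1
--             temp += 1
--
--     rm_list.sort(reverse=True)
--     for index in rm_list:
--         for index3 in range(len(fault_location)):
--             if index <= fault_location[index3]:
--                 fault_location[index3] -= 1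
--
--     for index1 in reversed(range(test_num)):
--         for item in rm_list:
--             del covMatrix_int[index1][item]
--
--     return covMatrix_int, fault_location, code_to_complete,rm_list
-- ===== SOURCE B (Python) =====
-- # B: one classifying pass + prefix-count table + one filter pass per row (mutates covMatrix_int rows and fault_location in place, like A)
-- def clean_cov(covMatrix_int, fault_location):
--     first = covMatrix_int[0]
--     code_num = len(first)
--     # one pass: classify columns and build prefix counts of removed columns
--     removed = []
--     kept = []
--     cum = []
--     c = 0
--     for j in range(code_num):
--         if first[j] == 2:
--             removed.append(j)
--             c += 1
--         else:
--             kept.append(j)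
--         cum.append(c)
--     total = c
--     code_to_complete = dict(enumerate(kept))
--     # remap faults by a single table lookup (clamped)
--     for i in range(len(fault_location)):
--         f = fault_location[i]
--         if f >= code_num:
--             fault_location[i] = f - total
--         elif f >= 0:
--             fault_location[i] = f - cum[f]
--     removed_set = set(removed)
--     for row in covMatrix_int:
--         row[:] = [v for j, v in enumerate(row) if j not in removed_set]
--     return covMatrix_int, fault_location, code_to_complete, removed[::-1]
-- ===== Notes on version B (the rewrite author's own statement) =====
-- stated objective: alternative
-- what changed: Replaces A's per-fault rescans of rm_list and per-row repeated del calls by one classifying pass over row 0 that also builds a prefix-count table, a single clamped table lookup per fault, and one enumerate-filter pass per row.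
-- crash fix: On non-empty matrices where some row is shorter than a flagged (value-2) column index of row 0, A raises IndexError in del covMatrix_int[index1][item]; B returns the matrix with the flagged columns filtered out of each row. — e.g. on clean_cov([[2], []], []): A raises IndexError, B returns ([[], []], [], [], [0])
import Mathlib
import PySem

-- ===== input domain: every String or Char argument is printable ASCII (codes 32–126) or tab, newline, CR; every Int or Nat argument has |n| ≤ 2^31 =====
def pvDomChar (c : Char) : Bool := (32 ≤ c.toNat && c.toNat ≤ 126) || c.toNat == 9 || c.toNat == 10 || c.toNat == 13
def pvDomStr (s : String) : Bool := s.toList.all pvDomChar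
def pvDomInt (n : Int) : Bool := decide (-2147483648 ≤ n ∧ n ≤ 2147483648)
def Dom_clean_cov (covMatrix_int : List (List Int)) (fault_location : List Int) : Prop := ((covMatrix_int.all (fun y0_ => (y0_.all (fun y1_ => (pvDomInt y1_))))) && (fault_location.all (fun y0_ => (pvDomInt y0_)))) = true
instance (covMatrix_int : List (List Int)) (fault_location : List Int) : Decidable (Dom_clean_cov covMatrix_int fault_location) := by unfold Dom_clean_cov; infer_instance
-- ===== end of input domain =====

-- B restructures A: one classifying pass over row 0 with a prefix-count table, one clamped table
-- lookup per fault, and one enumerate-filter pass per row, instead of A's per-fault scans of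
-- rm_list and per-row repeated `del`; both Pythons mutate covMatrix_int's rows and fault_location
-- in place the same way, and the equivalence proved here is about the returned value.

-- ===== PORT A =====
def clean_cov (covMatrix_int : List (List Int)) (fault_location : List Int) : List (List Int) × List Int × (List (Int × Int)) × List Int :=
  let row0 := covMatrix_int.headD []        -- covMatrix_int[0]; Pre_ excludes the empty matrix (IndexError)
  let code_num := row0.length
  -- for index1 in range(code_num): classify; getD is exact since index1 < code_num
  let st := (List.range code_num).foldl
      (fun (st : List (Int × Int) × List Int × Int) i =>
        if row0.getD i 0 == 2 then (st.1, st.2.1 ++ [(i : Int)], st.2.2)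
        else (st.1 ++ [(st.2.2, (i : Int))], st.2.1, st.2.2 + 1))
      ([], [], 0)
  let rm := PySem.List.sorted st.2.1 (fun x => x) true       -- rm_list.sort(reverse=True)
  -- for index in rm_list: decrement every fault ≥ index (indexwise in-place update = map)
  let fl2 := rm.foldl (fun acc idx => acc.map (fun f => if idx ≤ f then f - 1 else f)) fault_location
  -- for index1 in reversed(range(test_num)): for item in rm_list: del cov[index1][item]
  -- rows are mutated independently, so the reversed row order is a map over rows;
  -- `del r[item]` is pop? (none = IndexError, excluded by Pre_)
  let cov2 := covMatrix_int.map
      (fun row => rm.foldl (fun r item => ((PySem.List.pop? r item).map Prod.snd).getD r) row)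
  (cov2, fl2, st.1, rm)

-- ===== PORT B =====
def clean_cov_alt (covMatrix_int : List (List Int)) (fault_location : List Int) : List (List Int) × List Int × (List (Int × Int)) × List Int :=
  let first := covMatrix_int.headD []       -- covMatrix_int[0]
  let code_num := first.length
  -- one pass: removed, kept, prefix counts cum, running count c (getD exact since j < code_num)
  let st := (List.range code_num).foldl
      (fun (st : List Int × List Int × List Int × Int) j =>
        if first.getD j 0 == 2 then (st.1 ++ [(j : Int)], st.2.1, st.2.2.1 ++ [st.2.2.2 + 1], st.2.2.2 + 1)
        else (st.1, st.2.1 ++ [(j : Int)], st.2.2.1 ++ [st.2.2.2], st.2.2.2))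
      ([], [], [], 0)
  let removed := st.1
  let kept := st.2.1
  let cum := st.2.2.1
  let total := st.2.2.2
  let code_to_complete := PySem.List.enumerate kept 0        -- dict(enumerate(kept))
  -- remap each fault by one clamped table lookup (getD exact: 0 ≤ f < code_num there)
  let fl2 := fault_location.map (fun f =>
      if (code_num : Int) ≤ f then f - total
      else if 0 ≤ f then f - cum.getD f.toNat 0
      else f)
  let removed_set := PySem.Set.ofList removed
  let cov2 := covMatrix_int.map
      (fun row => ((PySem.List.enumerate row 0).filter
                     (fun p => !(PySem.Set.contains removed_set p.1))).map Prod.snd)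
  (cov2, fl2, code_to_complete, removed.reverse)

-- ===== PRECONDITION & SPEC =====
-- Pre_ excludes exactly the inputs on which A raises IndexError: the empty matrix
-- (covMatrix_int[0]) and matrices where some row is too short for a `del row[item]`.
def Pre_clean_cov (covMatrix_int : List (List Int)) (fault_location : List Int) : Prop :=
  covMatrix_int ≠ [] ∧
  ∀ row ∈ covMatrix_int, ∀ j : Nat, j < (covMatrix_int.headD []).length →
    (covMatrix_int.headD []).getD j 0 = 2 → j < row.length
instance (covMatrix_int : List (List Int)) (fault_location : List Int) : Decidable (Pre_clean_cov covMatrix_int fault_location) := by unfold Pre_clean_cov; infer_instance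
def pvWitness_clean_cov : List (List Int) × List Int := ([[2, 0, 2], [1, 1, 0]], [0, 2, -1, 5])

-- A raises IndexError (del row[item] out of range) on non-empty matrices with a row shorter
-- than some flagged column of row 0; B returns the matrix with the flagged columns filtered out.
def Raises_clean_cov (covMatrix_int : List (List Int)) (fault_location : List Int) : Prop :=
  covMatrix_int ≠ [] ∧
  ¬ (∀ row ∈ covMatrix_int, ∀ j : Nat, j < (covMatrix_int.headD []).length →
      (covMatrix_int.headD []).getD j 0 = 2 → j < row.length)
instance (covMatrix_int : List (List Int)) (fault_location : List Int) : Decidable (Raises_clean_cov covMatrix_int fault_location) := by unfold Raises_clean_cov; infer_instance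
def pvRaiseWitness_clean_cov : List (List Int) × List Int := ([[2], []], [])
def pvRaiseWitnessOut_clean_cov : List (List Int) × List Int × (List (Int × Int)) × List Int := ([[], []], [], [], [0])

def Spec_clean_cov (covMatrix_int : List (List Int)) (fault_location : List Int) (out : List (List Int) × List Int × (List (Int × Int)) × List Int) : Prop := out = clean_cov_alt covMatrix_int fault_location
instance (covMatrix_int : List (List Int)) (fault_location : List Int) (out : List (List Int) × List Int × (List (Int × Int)) × List Int) : Decidable (Spec_clean_cov covMatrix_int fault_location out) := by unfold Spec_clean_cov; infer_instance

-- ===== CLAIM (what is proved, stated in full; the proofs are below) =====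
def Claim_equal_clean_cov : Prop := ∀ (covMatrix_int : List (List Int)) (fault_location : List Int), Dom_clean_cov covMatrix_int fault_location → Pre_clean_cov covMatrix_int fault_location → Spec_clean_cov covMatrix_int fault_location (clean_cov covMatrix_int fault_location)
def Claim_raises_clean_cov : Prop := (∀ (covMatrix_int : List (List Int)) (fault_location : List Int), Dom_clean_cov covMatrix_int fault_location → Raises_clean_cov covMatrix_int fault_location → ¬ Pre_clean_cov covMatrix_int fault_location) ∧ (Dom_clean_cov (pvRaiseWitness_clean_cov.1) (pvRaiseWitness_clean_cov.2) ∧ Raises_clean_cov (pvRaiseWitness_clean_cov.1) (pvRaiseWitness_clean_cov.2) ∧ clean_cov_alt (pvRaiseWitness_clean_cov.1) (pvRaiseWitness_clean_cov.2) = pvRaiseWitnessOut_clean_cov)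

-- ===== LEMMAS AND PROOFS =====
def pvEnumI : Int → List Nat → List (Int × Int)
  | _, [] => []
  | t, x :: xs => (t, (x : Int)) :: pvEnumI (t + 1) xs
def pvCum (q : Nat → Bool) : Int → List Nat → List Int
  | _, [] => []
  | c, x :: xs => if q x then (c + 1) :: pvCum q (c + 1) xs else c :: pvCum q c xs

theorem foldA_eq (q : Nat → Bool) : ∀ (l : List Nat) (ctc : List (Int × Int)) (rm : List Int) (t : Int),
    l.foldl (fun (st : List (Int × Int) × List Int × Int) i =>
        if q i then (st.1, st.2.1 ++ [(i : Int)], st.2.2)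
        else (st.1 ++ [(st.2.2, (i : Int))], st.2.1, st.2.2 + 1)) (ctc, rm, t)
    = (ctc ++ pvEnumI t (l.filter (fun i => !q i)),
       rm ++ (l.filter q).map (fun (i : Nat) => (i : Int)),
       t + (l.countP (fun i => !q i) : Int)) := by
  intro l
  induction l with
  | nil => intro ctc rm t; simp [pvEnumI]
  | cons x xs ih =>
    intro ctc rm t
    by_cases h : q x = true
    · simp [List.foldl_cons, h, ih, List.countP_cons]
    · simp only [Bool.not_eq_true] at h
      simp [List.foldl_cons, h, ih, pvEnumI]
      ring

theorem foldB_eq (q : Nat → Bool) : ∀ (l : List Nat) (removed kept : List Int) (cum : List Int) (c : Int),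
    l.foldl (fun (st : List Int × List Int × List Int × Int) j =>
        if q j then (st.1 ++ [(j : Int)], st.2.1, st.2.2.1 ++ [st.2.2.2 + 1], st.2.2.2 + 1)
        else (st.1, st.2.1 ++ [(j : Int)], st.2.2.1 ++ [st.2.2.2], st.2.2.2)) (removed, kept, cum, c)
    = (removed ++ (l.filter q).map (fun (i : Nat) => (i : Int)),
       kept ++ (l.filter (fun i => !q i)).map (fun (i : Nat) => (i : Int)),
       cum ++ pvCum q c l,
       c + (l.countP q : Int)) := by
  intro l
  induction l with
  | nil => intro removed kept cum c; simp [pvCum]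
  | cons x xs ih =>
    intro removed kept cum c
    by_cases h : q x = true
    · simp [List.foldl_cons, h, ih, pvCum]
      ring
    · simp only [Bool.not_eq_true] at h
      simp [List.foldl_cons, h, ih, pvCum]

theorem enumI_eq_enumerate : ∀ (l : List Nat) (t : Int),
    pvEnumI t l = PySem.List.enumerate (l.map (fun (i : Nat) => (i : Int))) t := by
  intro l
  induction l with
  | nil => intro t; simp [pvEnumI, PySem.List.enumerate_nil]
  | cons x xs ih => intro t; simp [pvEnumI, PySem.List.enumerate_cons, ih]

theorem map_foldl_comm (g : Int → Int → Int) : ∀ (rms : List Int) (fl : List Int),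
    rms.foldl (fun acc idx => acc.map (fun f => g idx f)) fl
    = fl.map (fun f => rms.foldl (fun f idx => g idx f) f) := by
  intro rms
  induction rms with
  | nil => intro fl; simp
  | cons r rs ih => intro fl; simp [List.foldl_cons, ih, List.map_map, Function.comp]

theorem pvCum_cons (q : Nat → Bool) (c : Int) (x : Nat) (xs : List Nat) :
    pvCum q c (x :: xs) = if q x then (c + 1) :: pvCum q (c + 1) xs else c :: pvCum q c xs := rfl

theorem countP_bound (f : Int) : ∀ (l : List Nat), l.Pairwise (· < ·) →
    ∀ lo : Int, (∀ x ∈ l, lo < (x : Int)) →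
    (l.countP (fun (i : Nat) => decide ((i : Int) ≤ f)) : Int) ≤ max (f - lo) 0 := by
  intro l
  induction l with
  | nil => intro _ lo _; simp
  | cons x xs ih =>
    intro hp lo hlo
    have hx : lo < (x : Int) := hlo x (by simp)
    have hxs : ∀ y ∈ xs, (x : Int) < (y : Int) := by
      intro y hy; exact_mod_cast (List.pairwise_cons.mp hp).1 y hy
    have hrec := ih (List.pairwise_cons.mp hp).2 x hxs
    rw [List.countP_cons]
    by_cases h : (x : Int) ≤ f
    · simp only [h, decide_true]
      push_cast
      omega
    · simp only [h, decide_false]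
      push_cast
      omega

theorem scalar_fold (f : Int) : ∀ (l : List Nat), l.Pairwise (· < ·) →
    l.foldr (fun (i : Nat) (acc : Int) => if (i : Int) ≤ acc then acc - 1 else acc) f
    = f - (l.countP (fun (i : Nat) => decide ((i : Int) ≤ f)) : Int) := by
  intro l
  induction l with
  | nil => simp
  | cons x xs ih =>
    intro hp
    have hxs : ∀ y ∈ xs, (x : Int) < (y : Int) := by
      intro y hy; exact_mod_cast (List.pairwise_cons.mp hp).1 y hy
    have hb := countP_bound f xs (List.pairwise_cons.mp hp).2 x hxs
    rw [List.foldr_cons, ih (List.pairwise_cons.mp hp).2, List.countP_cons]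
    by_cases h : (x : Int) ≤ f
    · have : (x : Int) ≤ f - (xs.countP (fun (i : Nat) => decide ((i : Int) ≤ f)) : Int) := by omega
      simp only [this, if_pos, h, decide_true]
      push_cast; omega
    · have hc : (xs.countP (fun (i : Nat) => decide ((i : Int) ≤ f)) : Int) = 0 := by
        have := Int.natCast_nonneg (xs.countP (fun (i : Nat) => decide ((i : Int) ≤ f)))
        omega
      rw [hc]
      simp only [h, decide_false]
      simp [h]
      omega

theorem cum_getD (q : Nat → Bool) : ∀ (l : List Nat) (c : Int) (k : Nat), k < l.length →
    (pvCum q c l).getD k 0 = c + (List.countP q (l.take (k + 1)) : Int) := by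
  intro l
  induction l with
  | nil => intro c k h; simp at h
  | cons x xs ih =>
    intro c k hk
    match k with
    | 0 =>
      by_cases h : q x = true
      · simp [pvCum, h, List.countP_cons]
      · simp only [Bool.not_eq_true] at h
        simp [pvCum, h, List.countP_cons]
    | k + 1 =>
      have hk' : k < xs.length := by simpa using hk
      by_cases h : q x = true
      · rw [pvCum_cons, if_pos h, List.getD_cons_succ, ih _ k hk', List.take_succ_cons]
        simp [List.countP_cons, h]
        push_cast; omega
      · simp only [Bool.not_eq_true] at h
        rw [pvCum_cons, h, if_neg (by simp), List.getD_cons_succ, ih _ k hk', List.take_succ_cons]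
        simp [List.countP_cons, h]

theorem countP_range_le (r : Nat → Bool) (k n : Nat) (h : k + 1 ≤ n) :
    List.countP r (List.range (k + 1))
    = List.countP (fun j => r j && decide (j < k + 1)) (List.range n) := by
  obtain ⟨m, rfl⟩ : ∃ m, n = (k + 1) + m := ⟨n - (k + 1), by omega⟩
  have hsplit : List.range (k + 1 + m) = List.range (k + 1) ++ (List.range m).map (fun x => k + 1 + x) :=
    List.range_add
  have h1 : List.countP (fun j => r j && decide (j < k + 1)) (List.range (k + 1))
      = List.countP r (List.range (k + 1)) := by
    apply List.countP_congr
    intro a ha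
    have : a < k + 1 := List.mem_range.mp ha
    simp [this]
  have h2 : List.countP (fun j => r j && decide (j < k + 1))
      (List.map (fun x => (k + 1) + x) (List.range m)) = 0 := by
    rw [List.countP_eq_zero]
    intro a ha
    obtain ⟨x, _, rfl⟩ := List.mem_map.mp ha
    simp
    omega
  rw [hsplit, List.countP_append, h1, h2]
  omega
def pvKeep {α : Type} (S : List Nat) : Nat → List α → List α
  | _, [] => []
  | i, x :: xs => if i ∈ S then pvKeep S (i + 1) xs else x :: pvKeep S (i + 1) xs

theorem pvKeep_cons {α : Type} (S : List Nat) (i : Nat) (x : α) (xs : List α) :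
    pvKeep S i (x :: xs) = if i ∈ S then pvKeep S (i + 1) xs else x :: pvKeep S (i + 1) xs := rfl

theorem keep_empty {α : Type} : ∀ (i : Nat) (row : List α), pvKeep [] i row = row := by
  intro i row
  induction row generalizing i with
  | nil => rfl
  | cons x xs ih => simp [pvKeep, ih]

theorem keep_congr {α : Type} (S T : List Nat) : ∀ (row : List α) (i : Nat),
    (∀ k, i ≤ k → (k ∈ S ↔ k ∈ T)) → pvKeep S i row = pvKeep T i row := by
  intro row
  induction row with
  | nil => intro i h; rfl
  | cons x xs ih =>
    intro i h
    have hmem : (i ∈ S) = (i ∈ T) := by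
      have := h i (le_refl i); simp [this]
    simp only [pvKeep, hmem]
    rw [ih (i + 1) (fun k hk => h k (by omega))]

theorem keep_erase {α : Type} : ∀ (row : List α) (i j : Nat) (S : List Nat),
    (∀ k ∈ S, j < k) → i ≤ j → j - i < row.length →
    j - i < (pvKeep S i row).length ∧
    (pvKeep S i row).eraseIdx (j - i) = pvKeep (j :: S) i row := by
  intro row
  induction row with
  | nil => intro i j S _ _ h; simp at h
  | cons x xs ih =>
    intro i j S hS hij hlen
    have hiS : i ∉ S := fun h => absurd (hS i h) (by omega)
    by_cases hij' : i = j
    · subst hij'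
      have h0 : i - i = 0 := by omega
      rw [h0]
      constructor
      · simp [pvKeep, hiS]
      · simp only [pvKeep, if_neg hiS, List.eraseIdx_cons_zero, if_pos (List.mem_cons_self)]
        exact keep_congr _ _ xs (i + 1) (fun k hk => by
          constructor
          · intro h; exact List.mem_cons_of_mem _ h
          · intro h; rcases List.mem_cons.mp h with h | h
            · omega
            · exact h)
    · have hlt : i < j := by omega
      have hsub : j - i = (j - (i + 1)) + 1 := by omega
      have hlen' : j - (i + 1) < xs.length := by simp at hlen; omega
      have hS' : ∀ k ∈ S, j < k := hS
      obtain ⟨ihlen, iheq⟩ := ih (i + 1) j S hS (by omega) hlen'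
      rw [hsub]
      have hiJS : i ∉ (j :: S) := by
        intro h; rcases List.mem_cons.mp h with h | h
        · omega
        · exact hiS h
      constructor
      · simp [pvKeep, hiS]; omega
      · simp only [pvKeep, if_neg hiS, if_neg hiJS, List.eraseIdx_cons_succ, iheq]

theorem del_foldr {α : Type} : ∀ (rem : List Nat) (row : List α), rem.Pairwise (· < ·) →
    (∀ j ∈ rem, j < row.length) →
    rem.foldr (fun j acc => ((PySem.List.pop? acc ((j : Nat) : Int)).map Prod.snd).getD acc) row
    = pvKeep rem 0 row := by
  intro rem
  induction rem with
  | nil => intro row _ _; exact (keep_empty 0 row).symm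
  | cons j rest ih =>
    intro row hp hlen
    have hrest : ∀ k ∈ rest, j < k := (List.pairwise_cons.mp hp).1
    rw [List.foldr_cons, ih row (List.pairwise_cons.mp hp).2
      (fun k hk => hlen k (List.mem_cons_of_mem _ hk))]
    have hj : j < row.length := hlen j List.mem_cons_self
    obtain ⟨hkl, hke⟩ := keep_erase row 0 j rest hrest (by omega) (by simpa using hj)
    rw [PySem.List.pop?_natCast _ j (by simpa using hkl)]
    simpa using hke

theorem filter_enum_keep (remN : List Nat) : ∀ {α : Type} (row : List α) (i : Nat),
    ((PySem.List.enumerate row (i : Int)).filter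
        (fun p => !(PySem.Set.contains (PySem.Set.ofList (remN.map (fun (x : Nat) => (x : Int)))) p.1))).map Prod.snd
    = pvKeep remN i row := by
  intro α row
  induction row with
  | nil => intro i; simp [PySem.List.enumerate_nil, pvKeep]
  | cons x xs ih =>
    intro i
    rw [PySem.List.enumerate_cons]
    have hmem : ((i : Int) ∈ PySem.Set.ofList (remN.map (fun (x : Nat) => (x : Int)))) ↔ i ∈ remN := by
      rw [PySem.Set.mem_ofList, List.mem_map]
      constructor
      · rintro ⟨a, ha, h⟩
        have : a = i := by exact_mod_cast h
        exact this ▸ ha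
      · intro h; exact ⟨i, h, rfl⟩
    have hc : (PySem.Set.contains (PySem.Set.ofList (remN.map (fun (x : Nat) => (x : Int)))) (i : Int))
        = decide (i ∈ remN) := by
      by_cases h : i ∈ remN
      · simp [PySem.Set.contains, List.contains_iff_mem, hmem, h]
      · simp [PySem.Set.contains, List.contains_iff_mem, hmem, h]
    have hstep : ((i : Int) + 1) = (((i + 1 : Nat)) : Int) := by push_cast; ring
    have hcond : (!(PySem.Set.contains
          (PySem.Set.ofList (remN.map (fun (x : Nat) => (x : Int)))) (((i : Int), x)).1))
        = !decide (i ∈ remN) := by simp only [hc]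
    rw [List.filter_cons, hcond, pvKeep_cons]
    by_cases h : i ∈ remN
    · rw [if_pos h, if_neg (by simp [h]), hstep, ih]
    · rw [if_neg h, if_pos (by simp [h]), List.map_cons, hstep, ih]

-- ===== VERDICT (by name: the statement is the Claim_ definition above) =====
theorem clean_cov_spec : Claim_equal_clean_cov := by
  intro cov fl _ hPre
  unfold Spec_clean_cov clean_cov clean_cov_alt
  obtain ⟨hne, hrows⟩ := hPre
  simp only [foldA_eq, foldB_eq, List.nil_append, zero_add]
  set row0 := cov.headD [] with hrow0
  set remN := List.filter (fun i => row0.getD i 0 == 2) (List.range row0.length) with hremN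
  set keptN := List.filter (fun i => !(row0.getD i 0 == 2)) (List.range row0.length) with hkeptN
  have hpairN : remN.Pairwise (· < ·) := List.Pairwise.filter _ List.pairwise_lt_range
  set rmA := remN.map (fun (i : Nat) => (i : Int)) with hrmA
  have hpairA : rmA.Pairwise (· < ·) := by
    rw [hrmA, List.pairwise_map]
    exact hpairN.imp (fun h => by exact_mod_cast h)
  have hsort : PySem.List.sorted rmA (fun x => x) true = rmA.reverse :=
    PySem.List.sorted_rev_eq_of_perm_of_pairwise_gt _ _ _ (List.reverse_perm rmA)
      (by rw [List.pairwise_reverse]; exact hpairA.imp (fun h => h))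
  have hmemrem : ∀ j ∈ remN, j < row0.length ∧ row0.getD j 0 = 2 := by
    intro j hj
    rw [hremN] at hj
    have h := List.mem_filter.mp hj
    exact ⟨List.mem_range.mp h.1, by simpa using h.2⟩
  rw [hsort]
  simp only [Prod.mk.injEq]
  refine ⟨?_, ?_, ?_, trivial⟩
  · -- matrix rows
    apply List.map_congr_left
    intro row hr
    have hlen : ∀ j ∈ remN, j < row.length := fun j hj =>
      hrows row hr j (hmemrem j hj).1 (hmemrem j hj).2
    rw [List.foldl_reverse, hrmA, List.foldr_map, del_foldr remN row hpairN hlen]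
    have h := filter_enum_keep remN row 0
    rw [← hrmA] at h
    simp only [Nat.cast_zero] at h
    exact h.symm
  · -- fault locations
    rw [map_foldl_comm]
    apply List.map_congr_left
    intro f _
    rw [List.foldl_reverse, hrmA, List.foldr_map, scalar_fold f remN hpairN]
    by_cases hge : (row0.length : Int) ≤ f
    · rw [if_pos hge]
      have hall : remN.countP (fun (i : Nat) => decide ((i : Int) ≤ f)) = remN.length :=
        List.countP_eq_length.mpr (fun j hj => by
          have := (hmemrem j hj).1
          simp only [decide_eq_true_eq]
          have : (j : Int) < (row0.length : Int) := by exact_mod_cast this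
          omega)
      rw [hall, hremN, ← List.countP_eq_length_filter]
    · rw [if_neg hge]
      by_cases hnn : 0 ≤ f
      · rw [if_pos hnn]
        set k := f.toNat with hk
        have hfk : f = (k : Int) := by omega
        have hkn : k + 1 ≤ row0.length := by omega
        have hcg := cum_getD (fun i => row0.getD i 0 == 2) (List.range row0.length) 0 k
          (by simpa using (by omega : k < row0.length))
        rw [List.take_range, min_eq_left hkn] at hcg
        rw [hcg, zero_add]
        have h1 : remN.countP (fun (i : Nat) => decide ((i : Int) ≤ f))
            = List.countP (fun (j : Nat) => decide ((j : Int) ≤ f) && (row0.getD j 0 == 2))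
                (List.range row0.length) := by
          rw [hremN, List.countP_filter]
        have h2 : List.countP (fun i => row0.getD i 0 == 2) (List.range (k + 1))
            = List.countP (fun j => (row0.getD j 0 == 2) && decide (j < k + 1))
                (List.range row0.length) :=
          countP_range_le _ k row0.length hkn
        have h3 : List.countP (fun (j : Nat) => decide ((j : Int) ≤ f) && (row0.getD j 0 == 2))
              (List.range row0.length)
            = List.countP (fun j => (row0.getD j 0 == 2) && decide (j < k + 1))
                (List.range row0.length) := by
          apply List.countP_congr
          intro a _
          have hd : decide ((a : Int) ≤ f) = decide (a < k + 1) := by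
            simp only [decide_eq_decide]
            omega
          rw [hd, Bool.and_comm]
        rw [h1, h3, ← h2]
      · rw [if_neg hnn]
        have h0 : remN.countP (fun (i : Nat) => decide ((i : Int) ≤ f)) = 0 :=
          List.countP_eq_zero.mpr (fun j _ => by
            simp only [decide_eq_true_eq]
            omega)
        rw [h0]
        simp
  · -- code_to_complete
    exact enumI_eq_enumerate keptN 0

@[simp]
theorem clean_cov_raises : Claim_raises_clean_cov := by
  unfold Claim_raises_clean_cov
  refine ⟨fun cov fl _ hR hP => hR.2 hP.2, by decide⟩
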